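-- pv_equiv track=rewrite | github.com/yibo-gh/CASE-24W-Med-Cond-Pred | staToolkit/umlsIcdTree.py | __service_getBestDes
-- ===== SOURCE A (Python) =====
-- from typing import Any, List, Dict, Tuple;
--
-- TTY_PRIORITY = [
--         "PN",
--         "PX",
--         "PXQ",
--         'PT',  # Preferred Term
--         'MH',  # MeSH Heading
--         'PN',  # Preferred Name (generic)
--         'PF',  # Preferred Form
--         'SY',  # Synonym
--         'ET',  # Entry Term
--         'HT',  # Hierarchical Term
--         'RPT',  # Related Preferred Term
--         'RHT',  # Related Hierarchical Term
--         'RAB',  # Related Abbreviation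
--         'SSN',  # Short String Name
--     ]
--
-- def __service_getBestDes(d: Dict[str, List[Tuple[str, str]]]) -> Dict[str, str]:
--     ret: Dict[str, str] = dict();
--     for cui, entries in d.items():
--         if not entries:
--             continue;
--
--         sorted_entries = sorted(
--             entries,
--             key=lambda td: TTY_PRIORITY.index(td[0])
--             if td[0] in TTY_PRIORITY
--             else len(TTY_PRIORITY)
--         )
--
--         ret[cui] = sorted_entries[0][1];
--
--     return ret;
-- ===== SOURCE B (Python) =====
-- from typing import Any, List, Dict, Tuple;
--
-- TTY_PRIORITY = [
--         "PN",
--         "PX",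
--         "PXQ",
--         'PT',  # Preferred Term
--         'MH',  # MeSH Heading
--         'PN',  # Preferred Name (generic)
--         'PF',  # Preferred Form
--         'SY',  # Synonym
--         'ET',  # Entry Term
--         'HT',  # Hierarchical Term
--         'RPT',  # Related Preferred Term
--         'RHT',  # Related Hierarchical Term
--         'RAB',  # Related Abbreviation
--         'SSN',  # Short String Name
--     ]
--
-- def __service_getBestDes(d: Dict[str, List[Tuple[str, str]]]) -> Dict[str, str]:
--     # Priority of each TTY = its first index in TTY_PRIORITY (unknown TTYs rank last).
--     prio: Dict[str, int] = {}
--     for i, t in enumerate(TTY_PRIORITY):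
--         if t not in prio:
--             prio[t] = i
--     n = len(TTY_PRIORITY)
--     ret: Dict[str, str] = {}
--     for cui, entries in d.items():
--         best = None
--         bestp = n + 1
--         for e in entries:
--             p = prio.get(e[0], n)
--             if p < bestp:  # strict: first entry attaining the minimum wins (stable-sort rule)
--                 best = e
--                 bestp = p
--         if best is not None:
--             ret[cui] = best[1]
--     return ret
-- ===== Notes on version B (the rewrite author's own statement) =====
-- stated objective: faster
-- what changed: Replaces the per-CUI stable sort (whose key does a linear TTY_PRIORITY.index scan per entry) by a one-time TTY->first-index dict and a single strict-< min-scan per entry list, keeping the first entry attaining the minimal priority.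
import Mathlib
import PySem

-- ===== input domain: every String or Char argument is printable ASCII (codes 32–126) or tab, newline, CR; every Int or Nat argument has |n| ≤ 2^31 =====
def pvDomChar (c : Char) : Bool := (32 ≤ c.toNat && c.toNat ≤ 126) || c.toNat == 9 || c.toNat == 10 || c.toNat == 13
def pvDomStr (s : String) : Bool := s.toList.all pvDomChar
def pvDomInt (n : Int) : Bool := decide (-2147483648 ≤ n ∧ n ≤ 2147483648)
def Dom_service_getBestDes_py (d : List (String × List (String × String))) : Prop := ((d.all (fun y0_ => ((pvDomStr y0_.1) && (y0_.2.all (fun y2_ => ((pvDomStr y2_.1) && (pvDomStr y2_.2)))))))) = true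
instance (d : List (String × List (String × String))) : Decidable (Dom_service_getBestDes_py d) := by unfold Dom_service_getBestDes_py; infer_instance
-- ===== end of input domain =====

-- ===== PORT A =====
-- B replaces A's per-CUI sort (list.index inside the key) by one precomputed TTY->index dict and a single min-scan per CUI.
def pvTty : List String := ["PN","PX","PXQ","PT","MH","PN","PF","SY","ET","HT","RPT","RHT","RAB","SSN"]

-- key=lambda td: TTY_PRIORITY.index(td[0]) if td[0] in TTY_PRIORITY else len(TTY_PRIORITY)
def pvAKey (td : String × String) : Int :=
  if pvTty.contains td.1 then (((PySem.List.index? pvTty td.1).getD 0 : Nat) : Int)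
  else PySem.List.len pvTty

def service_getBestDes_py (d : List (String × List (String × String))) : List (String × String) :=
  (d.foldl (fun (ret : PySem.Dict String String) p =>
    if p.2 = [] then ret
    else
      let sorted_entries := PySem.List.sorted p.2 pvAKey false
      ret.insert p.1 (sorted_entries.headD ("", "")).2) PySem.Dict.empty).items

-- ===== PORT B =====
-- prio = first index of each TTY in TTY_PRIORITY
def pvPrio : PySem.Dict String Int :=
  (PySem.List.enumerate pvTty).foldl
    (fun pr it => if pr.contains it.2 then pr else pr.insert it.2 it.1) PySem.Dict.empty

def pvN : Int := PySem.List.len pvTty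

-- the body of B's inner 'for e in entries' loop
def pvStep (st : Option (String × String) × Int) (e : String × String) : Option (String × String) × Int :=
  let pr := pvPrio.getD e.1 pvN
  if pr < st.2 then (some e, pr) else st

def service_getBestDes_py_alt (d : List (String × List (String × String))) : List (String × String) :=
  (d.foldl (fun (ret : PySem.Dict String String) p =>
    let r := p.2.foldl pvStep (none, pvN + 1)
    match r.1 with
    | none => ret
    | some b => ret.insert p.1 b.2) PySem.Dict.empty).items

-- ===== PRECONDITION & SPEC =====
def Spec_service_getBestDes_py (d : List (String × List (String × String))) (out : List (String × String)) : Prop := out = service_getBestDes_py_alt d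
instance (d : List (String × List (String × String))) (out : List (String × String)) : Decidable (Spec_service_getBestDes_py d out) := by unfold Spec_service_getBestDes_py; infer_instance

-- ===== CLAIM (what is proved, stated in full; the proofs are below) =====
def Claim_equal_service_getBestDes_py : Prop := ∀ (d : List (String × List (String × String))), Dom_service_getBestDes_py d → Spec_service_getBestDes_py d (service_getBestDes_py d)

-- ===== LEMMAS AND PROOFS =====

-- the dict lookup computes exactly A's sort key, and it is bounded by pvN
theorem pvKey_eq (s : String) :
    PySem.Dict.getD pvPrio s pvN =
      (if pvTty.contains s then (((PySem.List.index? pvTty s).getD 0 : Nat) : Int)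
       else PySem.List.len pvTty) ∧ PySem.Dict.getD pvPrio s pvN ≤ pvN := by
  by_cases h1 : s = "PN"; · subst h1; decide
  by_cases h2 : s = "PX"; · subst h2; decide
  by_cases h3 : s = "PXQ"; · subst h3; decide
  by_cases h4 : s = "PT"; · subst h4; decide
  by_cases h5 : s = "MH"; · subst h5; decide
  by_cases h6 : s = "PF"; · subst h6; decide
  by_cases h7 : s = "SY"; · subst h7; decide
  by_cases h8 : s = "ET"; · subst h8; decide
  by_cases h9 : s = "HT"; · subst h9; decide
  by_cases h10 : s = "RPT"; · subst h10; decide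
  by_cases h11 : s = "RHT"; · subst h11; decide
  by_cases h12 : s = "RAB"; · subst h12; decide
  by_cases h13 : s = "SSN"; · subst h13; decide
  have hp : pvPrio = ⟨[("PN",0),("PX",1),("PXQ",2),("PT",3),("MH",4),("PF",6),("SY",7),("ET",8),("HT",9),("RPT",10),("RHT",11),("RAB",12),("SSN",13)]⟩ := by decide
  rw [hp]
  have g1 : ("PN" == s) = false := beq_eq_false_iff_ne.mpr (fun h => h1 h.symm)
  have g2 : ("PX" == s) = false := beq_eq_false_iff_ne.mpr (fun h => h2 h.symm)
  have g3 : ("PXQ" == s) = false := beq_eq_false_iff_ne.mpr (fun h => h3 h.symm)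
  have g4 : ("PT" == s) = false := beq_eq_false_iff_ne.mpr (fun h => h4 h.symm)
  have g5 : ("MH" == s) = false := beq_eq_false_iff_ne.mpr (fun h => h5 h.symm)
  have g6 : ("PF" == s) = false := beq_eq_false_iff_ne.mpr (fun h => h6 h.symm)
  have g7 : ("SY" == s) = false := beq_eq_false_iff_ne.mpr (fun h => h7 h.symm)
  have g8 : ("ET" == s) = false := beq_eq_false_iff_ne.mpr (fun h => h8 h.symm)
  have g9 : ("HT" == s) = false := beq_eq_false_iff_ne.mpr (fun h => h9 h.symm)
  have g10 : ("RPT" == s) = false := beq_eq_false_iff_ne.mpr (fun h => h10 h.symm)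
  have g11 : ("RHT" == s) = false := beq_eq_false_iff_ne.mpr (fun h => h11 h.symm)
  have g12 : ("RAB" == s) = false := beq_eq_false_iff_ne.mpr (fun h => h12 h.symm)
  have g13 : ("SSN" == s) = false := beq_eq_false_iff_ne.mpr (fun h => h13 h.symm)
  simp [PySem.Dict.getD, PySem.Dict.get?, List.find?, pvTty, pvN, PySem.List.len,
    h1, h2, h3, h4, h5, h6, h7, h8, h9, h10, h11, h12, h13,
    g1, g2, g3, g4, g5, g6, g7, g8, g9, g10, g11, g12, g13]

-- the head of one insertBy step is one min?-fold step
theorem head?_insertBy {α : Type} (k : α → Int) (x : α) (ys : List α) :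
    (PySem.List.insertBy (fun a b => decide (k a < k b)) x ys).head? =
      (match ys.head? with
       | none => some x
       | some y => if k x < k y then some x else some y) := by
  cases ys with
  | nil => rfl
  | cons y t => simp only [PySem.List.insertBy, List.head?]; split_ifs <;> simp_all

-- head of the insertion-sort fold = the min?-style fold over the same list
theorem head?_foldl_insertBy {α : Type} (k : α → Int) (l : List α) (acc : List α) :
    (l.foldl (fun acc x => PySem.List.insertBy (fun a b => decide (k a < k b)) x acc) acc).head? =
      l.foldl (fun m x =>
        match m with
        | none => some x
        | some y => if k x < k y then some x else some y) acc.head? := by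
  induction l generalizing acc with
  | nil => rfl
  | cons x t ih =>
      rw [List.foldl_cons, List.foldl_cons, ih, head?_insertBy]

-- one step of the min?-fold (PySem.List.min?'s own step function)
def pvMinStep (m : Option (String × String)) (x : String × String) : Option (String × String) :=
  match m with
  | none => some x
  | some y => if PySem.Dict.getD pvPrio x.1 pvN < PySem.Dict.getD pvPrio y.1 pvN then some x else some y

-- packs B's (best, bestp) scan state from the min?-fold state
def pvSt (m : Option (String × String)) : Option (String × String) × Int :=
  match m with
  | none => (none, pvN + 1)
  | some b => (some b, PySem.Dict.getD pvPrio b.1 pvN)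

-- B's strict-< scan is the min?-fold, packed through pvSt
theorem scan_eq (l : List (String × String)) (m : Option (String × String)) :
    l.foldl pvStep (pvSt m) = pvSt (l.foldl pvMinStep m) := by
  induction l generalizing m with
  | nil => rfl
  | cons e t ih =>
      rw [List.foldl_cons, List.foldl_cons]
      have hstep : pvStep (pvSt m) e = pvSt (pvMinStep m e) := by
        cases m with
        | none =>
            have hb := (pvKey_eq e.1).2
            simp only [pvSt, pvStep, pvMinStep]
            rw [if_pos (by omega)]
        | some b =>
            simp only [pvSt, pvStep, pvMinStep]
            split_ifs <;> simp_all
      rw [hstep, ih]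

-- ===== VERDICT (by name: the statement is the Claim_ definition above) =====
theorem service_getBestDes_py_spec : Claim_equal_service_getBestDes_py := by
  intro d _
  unfold Spec_service_getBestDes_py service_getBestDes_py service_getBestDes_py_alt
  congr 1
  apply PySem.List.foldl_congr_mem
  intro ret p _
  cases hp : p.2 with
  | nil => simp [pvN, pvTty, PySem.List.len]
  | cons e t =>
      rw [if_neg (List.cons_ne_nil e t)]
      rw [show ((none : Option (String × String)), pvN + 1) = pvSt none from rfl, scan_eq]
      have hmin : (e :: t).foldl pvMinStep none = PySem.List.min? (e :: t) pvAKey := by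
        show (e :: t).foldl _ none = (e :: t).foldl _ none
        apply PySem.List.foldl_congr_mem
        intro m x _
        cases m with
        | none => rfl
        | some y =>
            simp only [pvMinStep, (pvKey_eq x.1).1, (pvKey_eq y.1).1, pvAKey]
            split_ifs <;> rfl
      rw [hmin]
      cases hm : PySem.List.min? (e :: t) pvAKey with
      | none => exact absurd ((PySem.List.min?_eq_none_iff (e :: t) pvAKey).mp hm) (List.cons_ne_nil e t)
      | some b =>
          have hhead : (PySem.List.sorted (e :: t) pvAKey false).head? = PySem.List.min? (e :: t) pvAKey := by
            rw [PySem.List.sorted_eq_foldl_insertBy, head?_foldl_insertBy]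
            rfl
          simp only [pvSt, List.headD_eq_head?, hhead, hm, Option.getD_some]
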